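-- pv_equiv track=rewrite | github.com/paddyoreilly/INTRA-scraper | scraperfuncs.old.py | xrasplit
-- ===== SOURCE A (Python) =====
-- def xrasplit(info):
--
--     split = {'B':[],'C':[],'X':[],'M':[]}
--
--     for i in info:
--         for s in split:
--             if s == i[1][0]:
--                 split[s] = split[s] + [i]
--                 break
--
--     return split
-- ===== SOURCE B (Python) =====
-- def xrasplit(info):
--     return {k: [i for i in info if i[1][0] == k] for k in ('B', 'C', 'X', 'M')}
-- ===== Notes on version B (the rewrite author's own statement) =====
-- stated objective: simpler
-- what changed: Replaces A's single pass with mutable dict state and an inner key-scan-with-break by a dict comprehension that builds each of the four fixed buckets with its own filtering pass over info.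
import Mathlib
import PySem

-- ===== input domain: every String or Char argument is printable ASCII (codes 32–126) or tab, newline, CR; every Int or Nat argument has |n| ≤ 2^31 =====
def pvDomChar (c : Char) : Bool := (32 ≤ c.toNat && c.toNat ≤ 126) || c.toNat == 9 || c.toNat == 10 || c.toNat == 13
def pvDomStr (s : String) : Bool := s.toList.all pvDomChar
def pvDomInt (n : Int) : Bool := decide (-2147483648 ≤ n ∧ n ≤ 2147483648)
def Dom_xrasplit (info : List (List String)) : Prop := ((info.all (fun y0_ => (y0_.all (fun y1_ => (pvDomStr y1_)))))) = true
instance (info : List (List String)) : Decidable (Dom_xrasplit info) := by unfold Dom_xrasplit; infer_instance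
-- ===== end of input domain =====

-- B is a dict comprehension: one filtering pass per fixed bucket key instead of A's
-- single pass with a mutable dict and an inner key scan with break (same return value).

-- i[1][0] as the 1-character string Python compares against the key (none = IndexError)
def pvFirst (i : List String) : Option String :=
  (PySem.List.pyGet? i 1).bind (fun t => (PySem.Str.pyGet? t 0).map (fun c => String.ofList [c]))

-- ===== PORT A =====
-- inner 'for s in split: if s == i[1][0]: split[s] = split[s] + [i]; break'
def xrasplitInner (split : PySem.Dict String (List (List String))) (keys : List String)
    (i : List String) : PySem.Dict String (List (List String)) :=
  match keys with
  | [] => split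
  | s :: rest =>
      if pvFirst i = some s then split.insert s (split.getD s [] ++ [i])
      else xrasplitInner split rest i

def xrasplit (info : List (List String)) : List (String × List (List String)) :=
  (info.foldl (fun split i => xrasplitInner split split.keys i)
    (PySem.Dict.ofList [("B", []), ("C", []), ("X", []), ("M", [])])).items

-- ===== PORT B =====
def xrasplit_alt (info : List (List String)) : List (String × List (List String)) :=
  ["B", "C", "X", "M"].map (fun k => (k, info.filter (fun i => pvFirst i = some k)))

-- ===== PRECONDITION & SPEC =====
-- excludes exactly the inputs where Python raises IndexError (an item shorter than 2, or an empty i[1])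
def Pre_xrasplit (info : List (List String)) : Prop :=
  info.all (fun i => decide (2 ≤ i.length) && decide (i.getD 1 "" ≠ "")) = true
instance (info : List (List String)) : Decidable (Pre_xrasplit info) := by unfold Pre_xrasplit; infer_instance
def pvWitness_xrasplit : List (List String) := [["a", "Bx"], ["b", "Zz"], ["c", "M"]]

def Spec_xrasplit (info : List (List String)) (out : List (String × List (List String))) : Prop := out = xrasplit_alt info
instance (info : List (List String)) (out : List (String × List (List String))) : Decidable (Spec_xrasplit info out) := by unfold Spec_xrasplit; infer_instance

-- ===== CLAIM (what is proved, stated in full; the proofs are below) =====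
def Claim_equal_xrasplit : Prop := ∀ (info : List (List String)), Dom_xrasplit info → Pre_xrasplit info → Spec_xrasplit info (xrasplit info)

-- ===== LEMMAS AND PROOFS =====

-- the fold's state always has exactly the four fixed keys; each step appends i to the matching bucket
theorem xrasplit_invariant (info : List (List String)) (bB bC bX bM : List (List String)) :
    (info.foldl (fun split i => xrasplitInner split split.keys i)
      (PySem.Dict.mk [("B", bB), ("C", bC), ("X", bX), ("M", bM)])).items
    = [("B", bB ++ info.filter (fun i => pvFirst i = some "B")),
       ("C", bC ++ info.filter (fun i => pvFirst i = some "C")),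
       ("X", bX ++ info.filter (fun i => pvFirst i = some "X")),
       ("M", bM ++ info.filter (fun i => pvFirst i = some "M"))] := by
  induction info generalizing bB bC bX bM with
  | nil => simp
  | cons i rest ih =>
      simp only [List.foldl_cons, List.filter_cons]
      by_cases hB : pvFirst i = some "B"
      · have hstep : xrasplitInner (PySem.Dict.mk [("B", bB), ("C", bC), ("X", bX), ("M", bM)])
            (PySem.Dict.mk [("B", bB), ("C", bC), ("X", bX), ("M", bM)]).keys i
            = PySem.Dict.mk [("B", bB ++ [i]), ("C", bC), ("X", bX), ("M", bM)] := by
          simp [xrasplitInner, hB, PySem.Dict.keys, PySem.Dict.insert, PySem.Dict.getD,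
            PySem.Dict.get?]
        rw [hstep, ih]; simp [hB, List.append_assoc]
      · by_cases hC : pvFirst i = some "C"
        · have hstep : xrasplitInner (PySem.Dict.mk [("B", bB), ("C", bC), ("X", bX), ("M", bM)])
              (PySem.Dict.mk [("B", bB), ("C", bC), ("X", bX), ("M", bM)]).keys i
              = PySem.Dict.mk [("B", bB), ("C", bC ++ [i]), ("X", bX), ("M", bM)] := by
            simp [xrasplitInner, hC, PySem.Dict.keys, PySem.Dict.insert, PySem.Dict.getD,
              PySem.Dict.get?]
          rw [hstep, ih]; simp [hC, List.append_assoc]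
        · by_cases hX : pvFirst i = some "X"
          · have hstep : xrasplitInner (PySem.Dict.mk [("B", bB), ("C", bC), ("X", bX), ("M", bM)])
                (PySem.Dict.mk [("B", bB), ("C", bC), ("X", bX), ("M", bM)]).keys i
                = PySem.Dict.mk [("B", bB), ("C", bC), ("X", bX ++ [i]), ("M", bM)] := by
              simp [xrasplitInner, hX, PySem.Dict.keys, PySem.Dict.insert,
                PySem.Dict.getD, PySem.Dict.get?]
            rw [hstep, ih]; simp [hX, List.append_assoc]
          · by_cases hM : pvFirst i = some "M"
            · have hstep : xrasplitInner (PySem.Dict.mk [("B", bB), ("C", bC), ("X", bX), ("M", bM)])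
                  (PySem.Dict.mk [("B", bB), ("C", bC), ("X", bX), ("M", bM)]).keys i
                  = PySem.Dict.mk [("B", bB), ("C", bC), ("X", bX), ("M", bM ++ [i])] := by
                simp [xrasplitInner, hM, PySem.Dict.keys, PySem.Dict.insert,
                  PySem.Dict.getD, PySem.Dict.get?]
              rw [hstep, ih]; simp [hM, List.append_assoc]
            · have hstep : xrasplitInner (PySem.Dict.mk [("B", bB), ("C", bC), ("X", bX), ("M", bM)])
                  (PySem.Dict.mk [("B", bB), ("C", bC), ("X", bX), ("M", bM)]).keys i
                  = PySem.Dict.mk [("B", bB), ("C", bC), ("X", bX), ("M", bM)] := by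
                simp [xrasplitInner, hB, hC, hX, hM, PySem.Dict.keys]
              rw [hstep, ih]; simp [hB, hC, hX, hM]

-- ===== VERDICT (by name: the statement is the Claim_ definition above) =====
theorem xrasplit_spec : Claim_equal_xrasplit := by
  intro info _ _
  unfold Spec_xrasplit xrasplit xrasplit_alt
  have h0 : PySem.Dict.ofList [("B", ([] : List (List String))), ("C", []), ("X", []), ("M", [])]
      = PySem.Dict.mk [("B", []), ("C", []), ("X", []), ("M", [])] := rfl
  rw [h0, xrasplit_invariant]
  simp
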